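-- pv_equiv track=rewrite | github.com/archana-06/CSA0605-DAA | prg 20 (odd is odd even is even).py | sort_even_odd_positions
-- ===== SOURCE A (Python) =====
-- def sort_even_odd_positions(nums):
--     evens = [num for num in nums if num % 2 == 0]
--     odds = [num for num in nums if num % 2 == 1]
--     result = [0] * len(nums)
--     even_index, odd_index = 0, 1
--     for num in evens:
--         result[even_index] = num
--         even_index += 2
--     for num in odds:
--         result[odd_index] = num
--         odd_index += 2
--     return result
-- ===== SOURCE B (Python) =====
-- def sort_even_odd_positions(nums):
--     evens = [x for x in nums if x % 2 == 0]
--     odds = [x for x in nums if x % 2 == 1]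
--     return [evens[i // 2] if i % 2 == 0 else odds[i // 2] for i in range(len(nums))]
-- ===== Notes on version B (the rewrite author's own statement) =====
-- stated objective: simpler
-- what changed: B computes each output position directly by a gather comprehension (slot i reads evens[i//2] or odds[i//2]) instead of A's scatter loops that write into a preallocated array at running even/odd indices.
import Mathlib
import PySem

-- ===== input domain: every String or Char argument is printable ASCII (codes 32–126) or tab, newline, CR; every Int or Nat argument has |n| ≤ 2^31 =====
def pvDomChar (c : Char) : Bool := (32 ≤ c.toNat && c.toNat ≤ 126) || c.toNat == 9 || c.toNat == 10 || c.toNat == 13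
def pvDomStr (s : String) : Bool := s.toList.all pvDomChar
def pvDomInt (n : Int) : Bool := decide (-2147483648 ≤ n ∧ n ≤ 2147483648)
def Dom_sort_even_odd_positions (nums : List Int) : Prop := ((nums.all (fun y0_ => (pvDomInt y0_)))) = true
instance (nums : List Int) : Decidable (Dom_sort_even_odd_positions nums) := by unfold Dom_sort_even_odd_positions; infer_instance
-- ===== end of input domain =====

-- B gathers each output slot directly (slot i reads evens[i//2] or odds[i//2]) instead of A's
-- scatter loops writing into a preallocated array at running even/odd indices; same cost.


-- ===== PORT A =====
-- 'result[i] = num' is ported as List.set; Python raises IndexError when i ≥ len(result),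
-- and Pre_ excludes exactly those inputs.
def sort_even_odd_positions (nums : List Int) : List Int :=
  let evens := nums.filter (fun num => PySem.Int.mod num 2 == 0)
  let odds := nums.filter (fun num => PySem.Int.mod num 2 == 1)
  let result := List.replicate nums.length (0 : Int)
  let st1 := evens.foldl (fun (st : List Int × Nat) num => (st.1.set st.2 num, st.2 + 2)) (result, 0)
  let st2 := odds.foldl (fun (st : List Int × Nat) num => (st.1.set st.2 num, st.2 + 2)) (st1.1, 1)
  st2.1

-- ===== PORT B =====
-- 'evens[i // 2]' / 'odds[i // 2]' are ported with pyGetD; under Pre_ every such index is in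
-- range (Python raises IndexError exactly on the inputs Pre_ excludes), so the port is exact on Pre_.
def sort_even_odd_positions_alt (nums : List Int) : List Int :=
  let evens := nums.filter (fun x => PySem.Int.mod x 2 == 0)
  let odds := nums.filter (fun x => PySem.Int.mod x 2 == 1)
  (PySem.List.pyRange 0 (nums.length : Int) 1).map (fun i =>
    if PySem.Int.mod i 2 == 0 then PySem.List.pyGetD evens (PySem.Int.floordiv i 2) 0
    else PySem.List.pyGetD odds (PySem.Int.floordiv i 2) 0)

-- ===== PRECONDITION & SPEC =====
-- Pre_ admits exactly the inputs where Python A returns: the count of even elements must equal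
-- ceil(n/2) (otherwise some 'result[i] = num' in A raises IndexError).
def Pre_sort_even_odd_positions (nums : List Int) : Prop :=
  2 * nums.countP (fun num => num % 2 == 0) = nums.length + nums.length % 2
instance (nums : List Int) : Decidable (Pre_sort_even_odd_positions nums) := by
  unfold Pre_sort_even_odd_positions; infer_instance
def pvWitness_sort_even_odd_positions : List Int := [2, 3, 4, 5, 6]
def Spec_sort_even_odd_positions (nums : List Int) (out : List Int) : Prop := out = sort_even_odd_positions_alt nums
instance (nums : List Int) (out : List Int) : Decidable (Spec_sort_even_odd_positions nums out) := by unfold Spec_sort_even_odd_positions; infer_instance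

-- ===== CLAIM (what is proved, stated in full; the proofs are below) =====
def Claim_equal_sort_even_odd_positions : Prop := ∀ (nums : List Int), Dom_sort_even_odd_positions nums → Pre_sort_even_odd_positions nums → Spec_sort_even_odd_positions nums (sort_even_odd_positions nums)

-- ===== LEMMAS AND PROOFS =====

-- A's fill loop, as a structural recursion.
def pvFill (res : List Int) (i : Nat) : List Int → List Int
  | [] => res
  | x :: xs => pvFill (res.set i x) (i + 2) xs

theorem pvFill_eq_foldl (xs : List Int) (res : List Int) (i : Nat) :
    xs.foldl (fun (st : List Int × Nat) num => (st.1.set st.2 num, st.2 + 2)) (res, i)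
      = (pvFill res i xs, i + 2 * xs.length) := by
  induction xs generalizing res i with
  | nil => simp [pvFill]
  | cons x xs ih => simp [pvFill, List.foldl, ih]; omega

theorem pvFill_cons (x : Int) (res : List Int) (i : Nat) (xs : List Int) :
    pvFill (x :: res) (i + 1) xs = x :: pvFill res i xs := by
  induction xs generalizing res i with
  | nil => rfl
  | cons y ys ih => rw [pvFill, pvFill, List.set_cons_succ]; exact ih (res.set i y) (i + 2)

theorem pvFill_cons2 (x y : Int) (res : List Int) (i : Nat) (xs : List Int) :
    pvFill (x :: y :: res) (i + 2) xs = x :: y :: pvFill res i xs := by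
  rw [show i + 2 = (i + 1) + 1 from rfl, pvFill_cons, pvFill_cons]

theorem pvFill_set_comm (xs : List Int) (res : List Int) (i m : Nat) (v : Int)
    (h : m % 2 ≠ i % 2) :
    pvFill (res.set m v) i xs = (pvFill res i xs).set m v := by
  induction xs generalizing res i with
  | nil => rfl
  | cons x xs ih =>
    have hne : m ≠ i := by omega
    rw [pvFill, pvFill, List.set_comm _ _ hne, ih _ _ (by omega)]

-- Filling at even indices and at odd indices commutes (disjoint positions).
theorem pvFill_comm (xs ys : List Int) (res : List Int) (i j : Nat)
    (h : i % 2 ≠ j % 2) :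
    pvFill (pvFill res i xs) j ys = pvFill (pvFill res j ys) i xs := by
  induction xs generalizing res i with
  | nil => rfl
  | cons x xs ih =>
    rw [pvFill, ih _ _ (by omega), pvFill_set_comm ys _ _ _ _ h, pvFill]

theorem pv_mod_two (num : Int) :
    (PySem.Int.mod num 2 == 1) = !(PySem.Int.mod num 2 == 0) := by
  rw [PySem.Int.mod_eq_emod_of_pos (by norm_num : (0:Int) < 2)]
  rcases Int.emod_two_eq_zero_or_one num with h | h <;> simp [h]

-- Core: filling odds at 1,3,… then evens at 0,2,… of a zero array of the right length
-- produces, at each position k, evens[k/2] for even k and odds[k/2] for odd k.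
theorem pvFill_eq_gather (es os : List Int)
    (h1 : os.length ≤ es.length) (h2 : es.length ≤ os.length + 1) :
    pvFill (pvFill (List.replicate (es.length + os.length) (0 : Int)) 1 os) 0 es
      = (List.range (es.length + os.length)).map
          (fun k => if k % 2 = 0 then es.getD (k / 2) 0 else os.getD (k / 2) 0) := by
  induction es generalizing os with
  | nil =>
    have : os = [] := by cases os with | nil => rfl | cons _ _ => simp at h1
    subst this; rfl
  | cons e es ih =>
    cases os with
    | nil =>
      have : es = [] := by cases es with | nil => rfl | cons _ _ => simp at h2
      subst this; rfl
    | cons o os =>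
      have hr : List.replicate ((e :: es).length + (o :: os).length) (0 : Int)
          = 0 :: 0 :: List.replicate (es.length + os.length) 0 := by
        have : (e :: es).length + (o :: os).length = (es.length + os.length) + 1 + 1 := by
          simp; omega
        rw [this, List.replicate_succ, List.replicate_succ]
      have hin : pvFill (0 :: 0 :: List.replicate (es.length + os.length) (0 : Int)) 1 (o :: os)
          = 0 :: o :: pvFill (List.replicate (es.length + os.length) 0) 1 os := by
        rw [pvFill, List.set_cons_succ, List.set_cons_zero, pvFill_cons2]
      have hrange : (e :: es).length + (o :: os).length = (es.length + os.length) + 1 + 1 := by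
        simp; omega
      rw [hr, hin, pvFill, List.set_cons_zero, pvFill_cons2,
        ih os (by simp at h1 ⊢; omega) (by simp at h2 ⊢; omega),
        hrange, List.range_succ_eq_map, List.range_succ_eq_map]
      simp only [List.map_cons, List.map_map]
      congr 2
      apply List.map_congr_left
      intro k _
      simp only [Function.comp_apply, Nat.succ_eq_add_one]
      have hmod : (k + 1 + 1) % 2 = k % 2 := by omega
      have hdiv : (k + 1 + 1) / 2 = k / 2 + 1 := by omega
      rw [hmod, hdiv]
      by_cases hk : k % 2 = 0 <;> simp [hk]

-- ===== VERDICT (by name: the statement is the Claim_ definition above) =====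
theorem sort_even_odd_positions_spec : Claim_equal_sort_even_odd_positions := by
  intro nums _ hpre
  unfold Spec_sort_even_odd_positions sort_even_odd_positions sort_even_odd_positions_alt
  have hmod : (fun num : Int => PySem.Int.mod num 2 == 0) = (fun num : Int => num % 2 == 0) := by
    funext num; rw [PySem.Int.mod_eq_emod_of_pos (by norm_num : (0:Int) < 2)]
  have hodds : nums.filter (fun num => PySem.Int.mod num 2 == 1)
      = nums.filter (fun num => !(PySem.Int.mod num 2 == 0)) := by
    congr 1; funext num; exact pv_mod_two num
  have hsplit : (nums.filter (fun num => PySem.Int.mod num 2 == 0)).length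
      + (nums.filter (fun num => !(PySem.Int.mod num 2 == 0))).length = nums.length :=
    (List.length_eq_length_filter_add _).symm
  have hlen_e : (nums.filter (fun num => PySem.Int.mod num 2 == 0)).length
      = nums.countP (fun num => num % 2 == 0) := by
    rw [hmod]; exact List.countP_eq_length_filter.symm
  have hm2 : nums.length % 2 = 0 ∨ nums.length % 2 = 1 := Nat.mod_two_eq_zero_or_one _
  unfold Pre_sort_even_odd_positions at hpre
  set es := nums.filter (fun num => PySem.Int.mod num 2 == 0) with hes
  set os := nums.filter (fun num => PySem.Int.mod num 2 == 1) with hos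
  have hsplit2 : es.length + os.length = nums.length := by rw [hodds]; exact hsplit
  have h1 : os.length ≤ es.length := by omega
  have h2 : es.length ≤ os.length + 1 := by omega
  have hn : nums.length = es.length + os.length := by omega
  simp only [pvFill_eq_foldl, hn]
  rw [pvFill_comm es os _ 0 1 (by omega), pvFill_eq_gather es os h1 h2,
    PySem.List.pyRange_one]
  simp only [Int.sub_zero, Int.toNat_natCast, List.map_map]
  apply List.map_congr_left
  intro k _
  simp only [Function.comp_apply, Int.zero_add,
    PySem.Int.mod_eq_emod_of_pos (by norm_num : (0:Int) < 2),
    PySem.Int.floordiv_eq_ediv_of_pos (by norm_num : (0:Int) < 2)]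
  have hc2 : ((k : Int) % 2 == 0) = (k % 2 == 0) := by
    rcases Nat.mod_two_eq_zero_or_one k with h | h <;>
      simp <;> omega
  have hd2 : (k : Int) / 2 = ((k / 2 : Nat) : Int) := by
    rw [Int.natCast_div]; norm_num
  rw [hd2, PySem.List.pyGetD_natCast, PySem.List.pyGetD_natCast]
  by_cases hk : k % 2 = 0
  · have : ((k : Int) % 2 = 0) := by omega
    simp [hk, this]
  · have : ¬ ((k : Int) % 2 = 0) := by omega
    simp [hk, this]
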